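-- pv_equiv track=rewrite | github.com/boannas/Photocell-checker | photocell/python_file/functions/process_freq.py | handle_overflow
-- ===== SOURCE A (Python) =====
-- def handle_overflow(timestamps):
--     """
--     Adjust timestamps to handle overflow from Arduino micros().
--
--     Parameters:
--         timestamps (list): List of timestamps in microseconds.
--
--     Returns:
--         list: Adjusted timestamps.
--     """
--     adjusted_timestamps = []
--     overflow_count = 0
--     max_micros = 2**32 - 1  # Maximum value before overflow
--
--     for i in range(len(timestamps)):
--         if i > 0 and timestamps[i] < timestamps[i - 1]:
--             overflow_count += 1
--         adjusted_timestamp = timestamps[i] + overflow_count * max_micros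
--         adjusted_timestamps.append(adjusted_timestamp)
--
--     return adjusted_timestamps
-- ===== SOURCE B (Python) =====
-- def handle_overflow(timestamps):
--     max_micros = 2**32 - 1
--     # Split the list into maximal runs that never wrap: start a new run at
--     # every position whose timestamp is smaller than the run's last element.
--     runs = []
--     cur = []
--     for t in timestamps:
--         if cur and t < cur[-1]:
--             runs.append(cur)
--             cur = [t]
--         else:
--             cur.append(t)
--     if cur:
--         runs.append(cur)
--     # Every element of the k-th run has seen exactly k overflows.
--     return [t + k * max_micros for k, run in enumerate(runs) for t in run]
-- ===== Notes on version B (the rewrite author's own statement) =====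
-- stated objective: alternative
-- what changed: Instead of carrying a running overflow counter and adding it per element, B splits the list into maximal wrap-free runs (a new run starts at each descent) and then offsets every element of the k-th run by k*max_micros via enumerate over the runs.
import Mathlib
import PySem

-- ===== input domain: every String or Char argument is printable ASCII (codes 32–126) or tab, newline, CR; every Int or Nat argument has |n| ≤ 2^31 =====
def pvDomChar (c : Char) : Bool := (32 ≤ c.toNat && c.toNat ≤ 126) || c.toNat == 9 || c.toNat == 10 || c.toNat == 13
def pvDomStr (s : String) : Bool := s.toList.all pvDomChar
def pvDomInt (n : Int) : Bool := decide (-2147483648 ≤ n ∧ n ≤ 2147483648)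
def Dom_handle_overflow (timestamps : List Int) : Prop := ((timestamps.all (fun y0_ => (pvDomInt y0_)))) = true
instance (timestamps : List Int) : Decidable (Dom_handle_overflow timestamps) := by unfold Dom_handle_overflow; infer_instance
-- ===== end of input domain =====

-- B replaces A's running-overflow-counter loop with a split into maximal wrap-free
-- runs followed by offsetting the k-th run by k*max_micros; objective: alternative.

-- ===== PORT A =====
-- literal port of A: index loop over range(len(timestamps)) carrying the output
-- list and the running overflow_count
def handle_overflow (timestamps : List Int) : List Int :=
  let max_micros : Int := 2 ^ 32 - 1
  ((PySem.List.pyRange 0 (timestamps.length : Int) 1).foldl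
    (fun (st : List Int × Int) i =>
      let oc : Int :=
        if 0 < i ∧ (PySem.List.pyGet? timestamps i).getD 0 <
            (PySem.List.pyGet? timestamps (i - 1)).getD 0
        then st.2 + 1 else st.2
      (st.1 ++ [(PySem.List.pyGet? timestamps i).getD 0 + oc * max_micros], oc))
    ([], 0)).1

-- ===== PORT B =====
-- literal port of Source B: split into runs (fold state = (runs, cur)), then the
-- enumerate-comprehension offsetting each element of the k-th run by k*max_micros
def handle_overflow_alt (timestamps : List Int) : List Int :=
  let max_micros : Int := 2 ^ 32 - 1
  let st := timestamps.foldl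
    (fun (st : List (List Int) × List Int) t =>
      if st.2 ≠ [] ∧ t < (PySem.List.pyGet? st.2 (-1)).getD 0
      then (st.1 ++ [st.2], [t])
      else (st.1, st.2 ++ [t]))
    ([], [])
  let runs := if st.2 ≠ [] then st.1 ++ [st.2] else st.1
  (PySem.List.enumerate runs).flatMap (fun p => p.2.map (fun t => t + p.1 * max_micros))

-- ===== PRECONDITION & SPEC =====
def Spec_handle_overflow (timestamps : List Int) (out : List Int) : Prop := out = handle_overflow_alt timestamps
instance (timestamps : List Int) (out : List Int) : Decidable (Spec_handle_overflow timestamps out) := by unfold Spec_handle_overflow; infer_instance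

-- ===== CLAIM (what is proved, stated in full; the proofs are below) =====
def Claim_equal_handle_overflow : Prop := ∀ (timestamps : List Int), Dom_handle_overflow timestamps → Spec_handle_overflow timestamps (handle_overflow timestamps)

-- ===== LEMMAS AND PROOFS =====

-- reference recursion: previous element `prev`, running overflow count `c`
def pvGo (prev c : Int) : List Int → List Int
  | [] => []
  | x :: xs =>
    let c' := if x < prev then c + 1 else c
    (x + c' * (2 ^ 32 - 1)) :: pvGo x c' xs

-- ---------- A-side: A equals the reference recursion ----------

lemma pvFoldA (ts : List Int) : ∀ (m : Nat) (k : Nat) (acc : List Int) (c : Int),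
    ts.length ≤ k + m → 1 ≤ k →
    ((PySem.List.pyRange (k : Int) (ts.length : Int) 1).foldl
      (fun (st : List Int × Int) i =>
        let oc : Int :=
          if 0 < i ∧ (PySem.List.pyGet? ts i).getD 0 <
              (PySem.List.pyGet? ts (i - 1)).getD 0
          then st.2 + 1 else st.2
        (st.1 ++ [(PySem.List.pyGet? ts i).getD 0 + oc * (2 ^ 32 - 1)], oc))
      (acc, c)).1
    = acc ++ pvGo ((PySem.List.pyGet? ts ((k : Int) - 1)).getD 0) c (ts.drop k) := by
  intro m
  induction m with
  | zero =>
    intro k acc c hle hk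
    rw [PySem.List.pyRange_one_eq_nil (by exact_mod_cast (by omega : ts.length ≤ k))]
    rw [List.drop_eq_nil_of_le (by omega)]
    simp [pvGo]
  | succ m ih =>
    intro k acc c hle hk
    by_cases hk' : k < ts.length
    · rw [PySem.List.pyRange_one_cons (by exact_mod_cast hk')]
      simp only [List.foldl_cons]
      have hpos : (0 : Int) < (k : Int) := by exact_mod_cast hk
      have hget : (PySem.List.pyGet? ts (k : Int)).getD 0 = ts[k] := by
        simp [PySem.List.pyGet?_natCast, List.getElem?_eq_getElem hk']
      have hdrop : ts.drop k = ts[k] :: ts.drop (k + 1) := List.drop_eq_getElem_cons hk'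
      have hcast : (k : Int) + 1 = ((k + 1 : Nat) : Int) := by push_cast; ring
      rw [hcast, ih (k + 1) _ _ (by omega) (by omega)]
      have hprev : ((k + 1 : Nat) : Int) - 1 = (k : Int) := by push_cast; ring
      rw [hprev, hget, hdrop]
      simp only [pvGo, hpos, true_and, List.append_assoc, List.singleton_append]
    · rw [PySem.List.pyRange_one_eq_nil (by exact_mod_cast (by omega : ts.length ≤ k))]
      rw [List.drop_eq_nil_of_le (by omega)]
      simp [pvGo]

lemma pvA_go : ∀ (ts : List Int),
    handle_overflow ts = match ts with
      | [] => []
      | p :: xs => p :: pvGo p 0 xs := by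
  intro ts
  cases ts with
  | nil => simp [handle_overflow, PySem.List.pyRange_one_eq_nil]
  | cons p xs =>
    unfold handle_overflow
    have hlen : (0 : Int) < ((p :: xs).length : Int) := by
      simp
    rw [PySem.List.pyRange_one_cons hlen]
    simp only [List.foldl_cons]
    have h0 : ¬ ((0 : Int) < 0 ∧ (PySem.List.pyGet? (p :: xs) 0).getD 0 <
        (PySem.List.pyGet? (p :: xs) (0 - 1)).getD 0) := by
      intro h; exact absurd h.1 (lt_irrefl 0)
    simp only [h0, if_neg, not_false_eq_true]
    have : (0 : Int) + 1 = ((1 : Nat) : Int) := by norm_num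
    rw [this, pvFoldA (p :: xs) (p :: xs).length 1 _ _ (by omega) (le_refl 1)]
    norm_num [PySem.List.pyGet?, PySem.List.pyIdx?]

-- ---------- B-side: B equals the reference recursion ----------

-- render runs starting at segment index k
def pvRender (k : Int) : List (List Int) → List Int
  | [] => []
  | r :: rs => r.map (fun t => t + k * (2 ^ 32 - 1)) ++ pvRender (k + 1) rs

lemma pvEnum_render : ∀ (rs : List (List Int)) (k : Int),
    (PySem.List.enumerate rs k).flatMap (fun p => p.2.map (fun t => t + p.1 * (2 ^ 32 - 1)))
      = pvRender k rs := by
  intro rs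
  induction rs with
  | nil => intro k; simp [PySem.List.enumerate_nil, pvRender]
  | cons r rs ih =>
    intro k
    simp only [PySem.List.enumerate_cons, List.flatMap_cons, ih, pvRender]

lemma pvRender_append : ∀ (rs : List (List Int)) (k : Int) (cur : List Int),
    pvRender k (rs ++ [cur])
      = pvRender k rs ++ cur.map (fun t => t + (k + rs.length) * (2 ^ 32 - 1)) := by
  intro rs
  induction rs with
  | nil => intro k cur; simp [pvRender]
  | cons r rs ih =>
    intro k cur
    simp only [List.cons_append, pvRender, ih, List.append_assoc, List.length_cons]
    congr 2
    have : k + 1 + (rs.length : Int) = k + ((rs.length + 1 : Nat) : Int) := by push_cast; ring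
    rw [this]

-- B's fold step, named for the proofs (definitionally the port's lambda)
def pvStep (st : List (List Int) × List Int) (t : Int) : List (List Int) × List Int :=
  if st.2 ≠ [] ∧ t < (PySem.List.pyGet? st.2 (-1)).getD 0
  then (st.1 ++ [st.2], [t])
  else (st.1, st.2 ++ [t])

lemma pvCurNe : ∀ (xs : List Int) (runs : List (List Int)) (cur : List Int),
    cur ≠ [] → (xs.foldl pvStep (runs, cur)).2 ≠ [] := by
  intro xs
  induction xs with
  | nil => intro runs cur h; simpa
  | cons x xs ih =>
    intro runs cur h
    simp only [List.foldl_cons, pvStep]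
    split_ifs
    · exact ih _ _ (by simp)
    · exact ih _ _ (by simp)

lemma pvFoldB : ∀ (xs : List Int) (runs : List (List Int)) (cur : List Int) (prev : Int),
    cur.getLast? = some prev →
    pvRender 0 ((xs.foldl pvStep (runs, cur)).1 ++ [(xs.foldl pvStep (runs, cur)).2])
      = pvRender 0 (runs ++ [cur]) ++ pvGo prev (runs.length : Int) xs := by
  intro xs
  induction xs with
  | nil => intro runs cur prev _; simp [pvGo]
  | cons x xs ih =>
    intro runs cur prev hlast
    have hne : cur ≠ [] := by intro h; simp [h] at hlast
    have hget : (PySem.List.pyGet? cur (-1)).getD 0 = prev := by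
      rw [PySem.List.pyGet?_neg_one, hlast]; rfl
    simp only [List.foldl_cons, pvStep, hne, hget, ne_eq, not_false_eq_true, true_and]
    by_cases h : x < prev
    · rw [if_pos h]
      rw [ih (runs ++ [cur]) [x] x (by rfl)]
      simp only [pvGo, if_pos h]
      rw [pvRender_append (runs ++ [cur]) 0 [x], pvRender_append runs 0 cur]
      simp only [List.length_append, List.length_singleton, List.map_cons, List.map_nil,
        List.append_assoc, List.singleton_append, zero_add]
      congr 2
    · rw [if_neg h]
      rw [ih runs (cur ++ [x]) x (by simp)]
      simp only [pvGo, if_neg h]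
      rw [pvRender_append runs 0 (cur ++ [x]), pvRender_append runs 0 cur]
      simp only [List.map_append, List.map_cons, List.map_nil, List.append_assoc,
        List.singleton_append, zero_add]

lemma pvB_go : ∀ (ts : List Int),
    handle_overflow_alt ts = match ts with
      | [] => []
      | p :: xs => p :: pvGo p 0 xs := by
  intro ts
  have hstep : (fun (st : List (List Int) × List Int) t =>
      if st.2 ≠ [] ∧ t < (PySem.List.pyGet? st.2 (-1)).getD 0
      then (st.1 ++ [st.2], [t])
      else (st.1, st.2 ++ [t])) = pvStep := rfl
  cases ts with
  | nil => simp [handle_overflow_alt, PySem.List.enumerate_nil]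
  | cons p xs =>
    unfold handle_overflow_alt
    rw [hstep]
    simp only [List.foldl_cons]
    have h1 : pvStep ([], []) p = ([], [p]) := by simp [pvStep]
    rw [h1]
    have hne := pvCurNe xs [] [p] (by simp)
    simp only [hne, ne_eq, not_false_eq_true, if_true]
    rw [pvEnum_render]
    rw [pvFoldB xs [] [p] p (by rfl)]
    simp [pvRender]

-- ===== VERDICT (by name: the statement is the Claim_ definition above) =====
theorem handle_overflow_spec : Claim_equal_handle_overflow := by
  intro ts _
  unfold Spec_handle_overflow
  rw [pvA_go, pvB_go]
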